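-- pv_equiv track=rewrite | github.com/yaeba/binary-search-solutions | solutions/Number-of-Sublists-With-Small-Left-Value.py | solve
-- ===== SOURCE A (Python) =====
-- def solve(nums):
--     # use a monotonic stack to store increasing nums
--     stack = []
--     res = 0
--     for num in nums:
--         while stack and stack[-1] > num:
--             # pop until we can store this num
--             stack.pop()
--         stack.append(num)
--         res += len(stack)
--
--     return res
-- ===== SOURCE B (Python) =====
-- def solve(nums):
--     # Per-left-index brute force: nums[j] contributes one count for each
--     # position i >= j it would survive on the monotonic stack, i.e. until
--     # the first strictly smaller element to its right.
--     res = 0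
--     n = len(nums)
--     for j in range(n):
--         cnt = 1
--         i = j + 1
--         while i < n and nums[i] >= nums[j]:
--             cnt += 1
--             i += 1
--         res += cnt
--     return res
-- ===== Notes on version B (the rewrite author's own statement) =====
-- stated objective: alternative
-- what changed: Replaces the monotonic stack whose size is summed at each step by a stackless nested loop that, for each left index j, counts forward until the first strictly smaller element and sums those run lengths.
import Mathlib
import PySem

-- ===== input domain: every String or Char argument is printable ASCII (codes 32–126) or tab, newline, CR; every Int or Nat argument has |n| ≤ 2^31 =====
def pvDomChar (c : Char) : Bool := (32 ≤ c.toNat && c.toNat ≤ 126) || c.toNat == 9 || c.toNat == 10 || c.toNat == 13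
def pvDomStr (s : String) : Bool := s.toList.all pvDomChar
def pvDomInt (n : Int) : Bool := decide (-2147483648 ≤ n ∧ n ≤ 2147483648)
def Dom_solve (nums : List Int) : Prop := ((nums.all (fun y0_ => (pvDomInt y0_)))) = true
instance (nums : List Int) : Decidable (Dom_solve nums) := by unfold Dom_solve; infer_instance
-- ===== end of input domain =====

-- B replaces A's monotonic stack (summing its size each step) by a stackless
-- per-left-index forward count of run lengths; objective: alternative (B is O(n^2), not faster).

-- ===== PORT A =====
-- 'while stack and stack[-1] > num: stack.pop()' — stack held top-first (head = Python stack[-1])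
def popA (stack : List Int) (num : Int) : List Int :=
  match stack with
  | [] => []
  | t :: rest => if t > num then popA rest num else t :: rest

def stepA (st : List Int × Int) (num : Int) : List Int × Int :=
  let s := num :: popA st.1 num          -- pop loop, then stack.append(num)
  (s, st.2 + (s.length : Int))           -- res += len(stack)

def solve (nums : List Int) : Int := (nums.foldl stepA ([], 0)).2

-- ===== PORT B =====
-- inner 'while i < n and nums[i] >= nums[j]: cnt += 1' over the elements after j
def bCount (v : Int) : List Int → Int
  | [] => 0
  | y :: ys => if v ≤ y then 1 + bCount v ys else 0

-- outer 'for j in range(n): res += cnt' as recursion over suffixes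
def solve_alt : List Int → Int
  | [] => 0
  | x :: xs => (1 + bCount x xs) + solve_alt xs

-- ===== PRECONDITION & SPEC =====
def Spec_solve (nums : List Int) (out : Int) : Prop := out = solve_alt nums
instance (nums : List Int) (out : Int) : Decidable (Spec_solve nums out) := by unfold Spec_solve; infer_instance

-- ===== CLAIM (what is proved, stated in full; the proofs are below) =====
def Claim_equal_solve : Prop := ∀ (nums : List Int), Dom_solve nums → Spec_solve nums (solve nums)

-- ===== LEMMAS AND PROOFS =====

-- survivors of p (elements with no strictly smaller element after them), latest first:
-- this is exactly A's stack after processing p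
def survList : List Int → List Int
  | [] => []
  | a :: q => survList q ++ (if q.all (fun y => decide (a ≤ y)) then [a] else [])

-- number of survivors of p that are ≤ x
def survCnt (x : Int) : List Int → Int
  | [] => 0
  | a :: q => (if q.all (fun y => decide (a ≤ y)) && decide (a ≤ x) then (1 : Int) else 0) + survCnt x q

theorem bCount_append_single (v x : Int) (q : List Int) :
    bCount v (q ++ [x]) =
      bCount v q + (if q.all (fun y => decide (v ≤ y)) && decide (v ≤ x) then (1 : Int) else 0) := by
  induction q with
  | nil => simp [bCount]
  | cons a q ih =>
    simp only [List.cons_append, bCount, List.all_cons]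
    by_cases h : v ≤ a <;> simp [h, ih] <;> ring

theorem solve_alt_append_single (x : Int) (p : List Int) :
    solve_alt (p ++ [x]) = solve_alt p + 1 + survCnt x p := by
  induction p with
  | nil => simp [solve_alt, bCount, survCnt]
  | cons a p ih =>
    simp only [List.cons_append, solve_alt, survCnt, ih, bCount_append_single]
    ring

theorem survList_append_single (x : Int) (p : List Int) :
    survList (p ++ [x]) = x :: (survList p).filter (fun a => decide (a ≤ x)) := by
  induction p with
  | nil => simp [survList]
  | cons a p ih =>
    simp only [List.cons_append, survList, List.all_append, List.all_cons, List.all_nil, ih,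
      List.filter_append]
    by_cases h1 : p.all (fun y => decide (a ≤ y)) <;> by_cases h2 : a ≤ x <;>
      simp [h1, h2, List.filter]

theorem survList_sorted (p : List Int) :
    (survList p).Pairwise (fun a b => b ≤ a) := by
  induction p using List.reverseRecOn with
  | nil => simp [survList]
  | append_singleton p x ih =>
    rw [survList_append_single]
    refine List.pairwise_cons.mpr ⟨?_, ih.filter _⟩
    intro b hb
    simp only [List.mem_filter, decide_eq_true_eq] at hb
    exact hb.2

theorem popA_eq_filter (x : Int) (s : List Int) (hs : s.Pairwise (fun a b => b ≤ a)) :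
    popA s x = s.filter (fun a => decide (a ≤ x)) := by
  induction s with
  | nil => simp [popA]
  | cons t rest ih =>
    rcases List.pairwise_cons.mp hs with ⟨hall, hrest⟩
    by_cases h : x < t
    · have : ¬ t ≤ x := not_le.mpr h
      simp [popA, h, this, ih hrest]
    · have ht : t ≤ x := not_lt.mp h
      have : List.filter (fun a => decide (a ≤ x)) rest = rest :=
        List.filter_eq_self.mpr (fun b hb => by simpa using le_trans (hall b hb) ht)
      simp [popA, h, ht, this]

theorem survCnt_eq_filter_length (x : Int) (p : List Int) :
    survCnt x p = (((survList p).filter (fun a => decide (a ≤ x))).length : Int) := by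
  induction p with
  | nil => simp [survCnt, survList]
  | cons a p ih =>
    simp only [survCnt, survList, List.filter_append, List.length_append, ih]
    by_cases h1 : p.all (fun y => decide (a ≤ y)) <;> by_cases h2 : a ≤ x <;>
      (simp [h1, h2, List.filter]; try ring)

theorem foldl_invariant (p : List Int) :
    (p.foldl stepA ([], 0)).1 = survList p ∧ (p.foldl stepA ([], 0)).2 = solve_alt p := by
  induction p using List.reverseRecOn with
  | nil => simp [survList, solve_alt]
  | append_singleton p x ih =>
    rw [List.foldl_append]
    obtain ⟨h1, h2⟩ := ih
    simp only [List.foldl_cons, List.foldl_nil, stepA, h1, h2]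
    rw [popA_eq_filter x _ (survList_sorted p)]
    constructor
    · rw [survList_append_single]
    · rw [solve_alt_append_single, survCnt_eq_filter_length]
      simp only [List.length_cons]
      push_cast
      ring

-- ===== VERDICT (by name: the statement is the Claim_ definition above) =====
theorem solve_spec : Claim_equal_solve := by
  intro nums _
  unfold Spec_solve solve
  exact (foldl_invariant nums).2
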